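-- pv_equiv track=rewrite | github.com/fastaifoundry/fastaiagent-sdk | fastaiagent/ui/routes/evals.py | _scorer_summary
-- ===== SOURCE A (Python) =====
-- from typing import Any
--
-- def _scorer_summary(cases: list[dict[str, Any]]) -> dict[str, dict[str, int]]:
--     """Per-scorer {pass, fail} counts across a run's cases."""
--     summary: dict[str, dict[str, int]] = {}
--     for case in cases:
--         per = case.get("per_scorer") or {}
--         if not isinstance(per, dict):
--             continue
--         for scorer, result in per.items():
--             bucket = summary.setdefault(scorer, {"pass": 0, "fail": 0})
--             if isinstance(result, dict) and result.get("passed"):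
--                 bucket["pass"] += 1
--             else:
--                 bucket["fail"] += 1
--     return summary
-- ===== SOURCE B (Python) =====
-- from typing import Any
--
-- def _scorer_summary(cases: list[dict[str, Any]]) -> dict[str, dict[str, int]]:
--     """Per-scorer {pass, fail} counts: flatten to an event list, then count per scorer."""
--     events: list[tuple[str, bool]] = []
--     for case in cases:
--         per = case.get("per_scorer") or {}
--         if not isinstance(per, dict):
--             continue
--         for scorer, result in per.items():
--             events.append((scorer, bool(isinstance(result, dict) and result.get("passed"))))
--     return {s: {"pass": sum(1 for t, ok in events if t == s and ok),
--                 "fail": sum(1 for t, ok in events if t == s and not ok)}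
--             for s in dict.fromkeys(t for t, _ in events)}
-- ===== Notes on version B (the rewrite author's own statement) =====
-- stated objective: alternative
-- what changed: Instead of A's single pass mutating incrementally-built nested {pass,fail} buckets, B first flattens the run into a plain (scorer, passed) event list and then, in a separate stage, counts each distinct scorer's passes and fails by scanning that event list, maintaining no dict during the traversal.
import Mathlib
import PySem

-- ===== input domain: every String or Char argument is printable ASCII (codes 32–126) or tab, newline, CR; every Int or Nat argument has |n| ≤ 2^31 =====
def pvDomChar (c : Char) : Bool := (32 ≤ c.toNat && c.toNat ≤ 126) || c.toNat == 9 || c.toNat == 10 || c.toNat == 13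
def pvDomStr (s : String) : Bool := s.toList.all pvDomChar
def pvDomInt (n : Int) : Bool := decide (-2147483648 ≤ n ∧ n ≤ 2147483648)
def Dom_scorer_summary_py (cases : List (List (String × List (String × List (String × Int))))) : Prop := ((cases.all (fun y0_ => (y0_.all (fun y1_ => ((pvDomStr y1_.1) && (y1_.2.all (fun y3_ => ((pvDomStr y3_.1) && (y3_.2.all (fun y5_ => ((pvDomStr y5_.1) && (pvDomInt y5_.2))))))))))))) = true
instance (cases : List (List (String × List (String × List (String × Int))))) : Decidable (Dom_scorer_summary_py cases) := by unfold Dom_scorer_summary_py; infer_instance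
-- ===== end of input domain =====

-- B replaces A's single pass over incrementally-mutated nested {pass,fail} buckets by two stages:
-- flatten to a plain (scorer, passed) event list, then count each distinct scorer's passes/fails
-- by scanning that list (objective: alternative); same return value.

-- ===== PORT A =====
-- shared helpers: both Pythons contain the very same lines
-- `per = case.get("per_scorer") or {}` and `isinstance(result, dict) and result.get("passed")`
-- (under the typed domain `per` is always a dict, so `or {}` only maps a missing key to {};
--  result.get("passed") is truthy iff the key is present with a nonzero int)
def pvPassed (result : List (String × Int)) : Bool :=
  (PySem.Dict.mk result).getD "passed" 0 != 0

def pvPer (case_ : List (String × List (String × List (String × Int)))) :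
    List (String × List (String × Int)) :=
  ((PySem.Dict.mk case_).get? "per_scorer").getD []

def pvDfltBucket : PySem.Dict String Int := PySem.Dict.ofList [("pass", 0), ("fail", 0)]

-- A: fold over cases/per_scorer maintaining the nested dict; `bucket = summary.setdefault(...)`
-- followed by the in-place `bucket[key] += 1` is the re-insertion of the modified bucket.
def scorer_summary_py (cases : List (List (String × List (String × List (String × Int))))) :
    List (String × List (String × Int)) :=
  let summary := cases.foldl (fun summary case_ =>
      (pvPer case_).foldl (fun summary pr =>
        let s1 := summary.setdefault pr.1 pvDfltBucket
        let bucket := s1.getD pr.1 pvDfltBucket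
        s1.insert pr.1 (bucket.modify (if pvPassed pr.2 then "pass" else "fail") 0 (· + 1)))
        summary)
    PySem.Dict.empty
  summary.items.map (fun p => (p.1, p.2.items))

-- ===== PORT B =====
-- B: stage 1 appends (scorer, passed) events to a flat list; stage 2 builds the result with a
-- comprehension over dict.fromkeys of the scorers (PySem.List.dedup), counting pass/fail events
-- per scorer by a scan of the event list (the 0/1 generator sums are counts, List.countP).
def scorer_summary_py_alt (cases : List (List (String × List (String × List (String × Int))))) :
    List (String × List (String × Int)) :=
  let events : List (String × Bool) := cases.foldl (fun ev case_ =>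
      (pvPer case_).foldl (fun ev pr => ev ++ [(pr.1, pvPassed pr.2)]) ev) []
  (PySem.List.dedup (events.map Prod.fst)).map (fun s =>
    (s, [("pass", (events.countP (fun e => e.1 == s && e.2) : Int)),
         ("fail", (events.countP (fun e => e.1 == s && !e.2) : Int))]))

-- ===== PRECONDITION & SPEC =====
def Spec_scorer_summary_py (cases : List (List (String × List (String × List (String × Int))))) (out : List (String × List (String × Int))) : Prop := out = scorer_summary_py_alt cases
instance (cases : List (List (String × List (String × List (String × Int))))) (out : List (String × List (String × Int))) : Decidable (Spec_scorer_summary_py cases out) := by unfold Spec_scorer_summary_py; infer_instance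

-- ===== CLAIM (what is proved, stated in full; the proofs are below) =====
def Claim_equal_scorer_summary_py : Prop := ∀ (cases : List (List (String × List (String × List (String × Int))))), Dom_scorer_summary_py cases → Spec_scorer_summary_py cases (scorer_summary_py cases)

-- ===== LEMMAS AND PROOFS =====
-- the flattened event list both programs conceptually traverse
def pvEvents (cases : List (List (String × List (String × List (String × Int))))) :
    List (String × Bool) :=
  cases.flatMap (fun c => (pvPer c).map (fun pr => (pr.1, pvPassed pr.2)))

-- an event's (scorer, outcome) key as A sees it
def pvToKey (e : String × Bool) : String × String :=
  (e.1, if e.2 then "pass" else "fail")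

def pvKey (pr : String × List (String × Int)) : String × String :=
  (pr.1, if pvPassed pr.2 then "pass" else "fail")

def pvFlat (cases : List (List (String × List (String × List (String × Int))))) :
    List (String × String) :=
  cases.flatMap (fun c => (pvPer c).map pvKey)

-- A's loop body as a function of the (scorer, outcome) key alone
def pvStepA (s : PySem.Dict String (PySem.Dict String Int)) (k : String × String) :
    PySem.Dict String (PySem.Dict String Int) :=
  (s.setdefault k.1 pvDfltBucket).insert k.1
    (((s.setdefault k.1 pvDfltBucket).getD k.1 pvDfltBucket).modify k.2 0 (· + 1))

-- the canonical bucket for a scorer: counts of its pass/fail keys in the flat list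
def pvBucket (kl : List (String × String)) (sc : String) : PySem.Dict String Int :=
  PySem.Dict.mk [("pass", (kl.count (sc, "pass") : Int)), ("fail", (kl.count (sc, "fail") : Int))]

theorem pvStepA_eq (s : PySem.Dict String (PySem.Dict String Int)) (k : String × String) :
    pvStepA s k = s.insert k.1 ((s.getD k.1 pvDfltBucket).modify k.2 0 (· + 1)) := by
  unfold pvStepA
  by_cases h : s.contains k.1
  · rw [PySem.Dict.setdefault_of_contains _ _ h]
  · rw [PySem.Dict.setdefault_of_not_contains _ _ (by simpa using h),
      PySem.Dict.getD_insert_self, PySem.Dict.insert_insert_self,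
      PySem.Dict.getD_of_not_contains _ _ (by simpa using h)]

theorem pv_keys_of_items {d : PySem.Dict String (PySem.Dict String Int)}
    {S : List String} {V : String → PySem.Dict String Int}
    (h : d.items = S.map (fun sc => (sc, V sc))) : d.keys = S := by
  simp only [PySem.Dict.keys, h, List.map_map]
  exact List.map_id' S

theorem pv_bucket_modify_pass (p f : Int) :
    (PySem.Dict.mk [("pass", p), ("fail", f)]).modify "pass" 0 (· + 1)
      = PySem.Dict.mk [("pass", p + 1), ("fail", f)] := rfl

theorem pv_bucket_modify_fail (p f : Int) :
    (PySem.Dict.mk [("pass", p), ("fail", f)]).modify "fail" 0 (· + 1)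
      = PySem.Dict.mk [("pass", p), ("fail", f + 1)] := rfl

theorem pv_bucket_append_self (l : List (String × String)) (x1 x2 : String)
    (hx2 : x2 = "pass" ∨ x2 = "fail") :
    (pvBucket l x1).modify x2 0 (· + 1) = pvBucket (l ++ [(x1, x2)]) x1 := by
  rcases hx2 with h | h <;> subst h <;>
    simp only [pvBucket, pv_bucket_modify_pass, pv_bucket_modify_fail,
      List.count_append, List.count_singleton] <;>
    simp

theorem pv_bucket_append_other (l : List (String × String)) (x1 x2 sc : String)
    (hsx : sc ≠ x1) :
    pvBucket l sc = pvBucket (l ++ [(x1, x2)]) sc := by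
  simp only [pvBucket, List.count_append, List.count_singleton]
  have h1 : ((x1, x2) = (sc, "pass")) = False := by
    simp [Prod.ext_iff]; intro h; exact fun _ => hsx h.symm
  have h2 : ((x1, x2) = (sc, "fail")) = False := by
    simp [Prod.ext_iff]; intro h; exact fun _ => hsx h.symm
  simp [h1, h2]

theorem pv_bucket_fresh (l : List (String × String)) (x1 x2 : String)
    (hx2 : x2 = "pass" ∨ x2 = "fail") (hnot : x1 ∉ l.map Prod.fst) :
    pvDfltBucket.modify x2 0 (· + 1) = pvBucket (l ++ [(x1, x2)]) x1 := by
  have hc : ∀ oc : String, List.count (x1, oc) l = 0 := by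
    intro oc
    rw [List.count_eq_zero]
    intro hmem
    exact hnot (by simpa using List.mem_map_of_mem (f := Prod.fst) hmem)
  have : pvDfltBucket = pvBucket l x1 := by
    simp only [pvBucket, hc, pvDfltBucket]
    rfl
  rw [this]
  exact pv_bucket_append_self l x1 x2 hx2

-- characterisation of A's nested-dict fold: scorers in first-occurrence order, counted buckets
theorem pv_Achar (kl : List (String × String)) (h : ∀ p ∈ kl, p.2 = "pass" ∨ p.2 = "fail") :
    (kl.foldl pvStepA PySem.Dict.empty).items
      = (PySem.Set.ofList (kl.map Prod.fst)).map (fun sc => (sc, pvBucket kl sc)) := by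
  induction kl using List.reverseRecOn with
  | nil => rfl
  | append_singleton l x ih =>
    obtain ⟨x1, x2⟩ := x
    have hl : ∀ p ∈ l, p.2 = "pass" ∨ p.2 = "fail" := fun p hp => h p (by simp [hp])
    have hx2 : x2 = "pass" ∨ x2 = "fail" := by simpa using h (x1, x2) (by simp)
    have ihl := ih hl
    have hkeys := pv_keys_of_items ihl
    rw [List.foldl_append, List.foldl_cons, List.foldl_nil, List.map_append, List.map_singleton,
      PySem.Set.ofList_append_singleton, pvStepA_eq]
    by_cases hmem : x1 ∈ PySem.Set.ofList (l.map Prod.fst)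
    · have hget : (l.foldl pvStepA PySem.Dict.empty).getD x1 pvDfltBucket = pvBucket l x1 := by
        apply PySem.Dict.getD_of_mem_items
        · rw [ihl]; exact List.mem_map_of_mem hmem
        · rw [hkeys]; exact PySem.Set.nodup_ofList _
      rw [PySem.Dict.items_insert_of_contains _ _
          (by rw [PySem.Dict.contains_eq_decide_mem_keys, hkeys]; simpa using hmem),
        PySem.Set.add_of_mem hmem, ihl, List.map_map]
      apply List.map_congr_left
      intro sc hsc
      by_cases hsx : sc = x1
      · subst hsx
        simp only [Function.comp_apply, beq_self_eq_true, if_pos]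
        rw [hget, pv_bucket_append_self l sc x2 hx2]
      · simp only [Function.comp_apply]
        rw [if_neg (by simpa using hsx), ← pv_bucket_append_other l x1 x2 sc hsx]
    · have hnc : (l.foldl pvStepA PySem.Dict.empty).contains x1 = false := by
        rw [PySem.Dict.contains_eq_decide_mem_keys, hkeys]; simpa using hmem
      rw [PySem.Dict.items_insert_of_not_contains _ _ hnc,
        PySem.Set.add_of_not_mem hmem, ihl, List.map_append, List.map_singleton,
        PySem.Dict.getD_of_not_contains _ _ hnc,
        pv_bucket_fresh l x1 x2 hx2 (by simpa using hmem)]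
      congr 1
      apply List.map_congr_left
      intro sc hsc
      have hsx : sc ≠ x1 := by
        rintro rfl
        exact hmem hsc
      rw [← pv_bucket_append_other l x1 x2 sc hsx]

theorem pv_key_snd (cases : List (List (String × List (String × List (String × Int))))) :
    ∀ p ∈ pvFlat cases, p.2 = "pass" ∨ p.2 = "fail" := by
  intro p hp
  simp only [pvFlat, List.mem_flatMap, List.mem_map] at hp
  obtain ⟨c, _, pr, _, rfl⟩ := hp
  by_cases h : pvPassed pr.2 <;> simp [pvKey, h]

-- A's nested loop is the flat fold of pvStepA over pvFlat
theorem pv_A_flat (cases : List (List (String × List (String × List (String × Int))))) :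
    scorer_summary_py cases
      = ((pvFlat cases).foldl pvStepA PySem.Dict.empty).items.map (fun p => (p.1, p.2.items)) := by
  show (cases.foldl (fun s c => (pvPer c).foldl (fun s pr => pvStepA s (pvKey pr)) s)
      PySem.Dict.empty).items.map (fun p => (p.1, p.2.items)) = _
  rw [pvFlat, List.foldl_flatMap]
  simp only [List.foldl_map]

-- B's appending loop builds exactly pvEvents
theorem pv_B_events (cases : List (List (String × List (String × List (String × Int))))) :
    cases.foldl (fun ev case_ =>
        (pvPer case_).foldl (fun ev pr => ev ++ [(pr.1, pvPassed pr.2)]) ev) []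
      = pvEvents cases := by
  simp only [PySem.List.foldl_append_singleton_eq_map]
  rw [pvEvents, PySem.List.foldl_append_eq_flatMap, List.nil_append]

-- the flat key list is the event list mapped through pvToKey
theorem pv_flat_eq_map (cases : List (List (String × List (String × List (String × Int))))) :
    pvFlat cases = (pvEvents cases).map pvToKey := by
  simp only [pvFlat, pvEvents, List.map_flatMap, List.map_map]
  rfl

theorem pv_count_pass (ev : List (String × Bool)) (sc : String) :
    List.count (sc, "pass") (ev.map pvToKey) = ev.countP (fun e => e.1 == sc && e.2) := by
  rw [List.count, List.countP_map]
  apply List.countP_congr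
  intro e _
  obtain ⟨t, ok⟩ := e
  cases ok <;> simp only [pvToKey, Function.comp_apply] <;>
    by_cases h : t = sc <;> simp [h]

theorem pv_count_fail (ev : List (String × Bool)) (sc : String) :
    List.count (sc, "fail") (ev.map pvToKey) = ev.countP (fun e => e.1 == sc && !e.2) := by
  rw [List.count, List.countP_map]
  apply List.countP_congr
  intro e _
  obtain ⟨t, ok⟩ := e
  cases ok <;> simp only [pvToKey, Function.comp_apply] <;>
    by_cases h : t = sc <;> simp [h]

theorem pv_main (cases : List (List (String × List (String × List (String × Int))))) :
    scorer_summary_py cases = scorer_summary_py_alt cases := by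
  rw [pv_A_flat]
  show _ = (PySem.List.dedup ((cases.foldl (fun ev case_ =>
      (pvPer case_).foldl (fun ev pr => ev ++ [(pr.1, pvPassed pr.2)]) ev) []).map Prod.fst)).map _
  rw [pv_B_events, pv_Achar _ (pv_key_snd cases), PySem.List.dedup_eq_ofList, pv_flat_eq_map,
    List.map_map]
  have : ((pvEvents cases).map pvToKey).map Prod.fst = (pvEvents cases).map Prod.fst := by
    simp only [List.map_map]
    apply List.map_congr_left
    intro e _
    rfl
  rw [this]
  apply List.map_congr_left
  intro sc _
  simp only [Function.comp_apply, pvBucket]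
  rw [pv_count_pass, pv_count_fail]

-- ===== VERDICT (by name: the statement is the Claim_ definition above) =====
theorem scorer_summary_py_spec : Claim_equal_scorer_summary_py := by
  intro cases _
  exact pv_main cases
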